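-- pv_equiv track=rewrite | github.com/Srinivas-jatothu/Privacy-Enhanced-Knowledge-Graph | Code_Summarization/step3_retrieve_graph_context.py | bfs_collect_neighbors
-- ===== SOURCE A (Python) =====
-- from typing import Any, Dict, List, Optional, Set, Tuple
--
-- def bfs_collect_neighbors(seed_ids: List[str], callers_idx: Dict[str,List[str]], callees_idx: Dict[str,List[str]], depth: int) -> Tuple[Set[str], Set[str]]:
--     """Perform limited BFS up to `depth` for callers and callees separately. Returns (callers_set, callees_set)"""
--     callers_seen: Set[str] = set()
--     callees_seen: Set[str] = set()
--
--     # BFS for callers (walk incoming edges)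
--     frontier = set(seed_ids)
--     for d in range(depth):
--         next_frontier = set()
--         for nid in frontier:
--             for caller in callers_idx.get(nid, []):
--                 if caller not in callers_seen and caller not in seed_ids:
--                     callers_seen.add(caller)
--                     next_frontier.add(caller)
--         frontier = next_frontier
--     # BFS for callees (walk outgoing edges)
--     frontier = set(seed_ids)
--     for d in range(depth):
--         next_frontier = set()
--         for nid in frontier:
--             for callee in callees_idx.get(nid, []):
--                 if callee not in callees_seen and callee not in seed_ids:
--                     callees_seen.add(callee)
--                     next_frontier.add(callee)
--         frontier = next_frontier
--     return callers_seen, callees_seen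
-- ===== SOURCE B (Python) =====
-- def bfs_collect_neighbors(seed_ids, callers_idx, callees_idx, depth):
--     """Single FIFO BFS per direction: a growing list used as queue of (node, depth)
--     pairs, seeded with the distinct seed ids at depth 0, instead of A's two
--     level-synchronous frontier-set loops over range(depth)."""
--     def walk(idx):
--         seen = set()
--         queue = [(s, 0) for s in dict.fromkeys(seed_ids)]
--         i = 0
--         while i < len(queue):
--             nid, dd = queue[i]
--             i += 1
--             if dd < depth:
--                 for nb in idx.get(nid, []):
--                     if nb not in seen and nb not in seed_ids:
--                         seen.add(nb)
--                         queue.append((nb, dd + 1))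
--         return seen
--     return walk(callers_idx), walk(callees_idx)
-- ===== Notes on version B (the rewrite author's own statement) =====
-- stated objective: alternative
-- what changed: A's two range(depth) level-synchronous frontier-set loops are replaced by a single FIFO BFS per direction over a list used as a queue of (node, depth) pairs seeded with the distinct seed ids at depth 0.
import Mathlib
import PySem

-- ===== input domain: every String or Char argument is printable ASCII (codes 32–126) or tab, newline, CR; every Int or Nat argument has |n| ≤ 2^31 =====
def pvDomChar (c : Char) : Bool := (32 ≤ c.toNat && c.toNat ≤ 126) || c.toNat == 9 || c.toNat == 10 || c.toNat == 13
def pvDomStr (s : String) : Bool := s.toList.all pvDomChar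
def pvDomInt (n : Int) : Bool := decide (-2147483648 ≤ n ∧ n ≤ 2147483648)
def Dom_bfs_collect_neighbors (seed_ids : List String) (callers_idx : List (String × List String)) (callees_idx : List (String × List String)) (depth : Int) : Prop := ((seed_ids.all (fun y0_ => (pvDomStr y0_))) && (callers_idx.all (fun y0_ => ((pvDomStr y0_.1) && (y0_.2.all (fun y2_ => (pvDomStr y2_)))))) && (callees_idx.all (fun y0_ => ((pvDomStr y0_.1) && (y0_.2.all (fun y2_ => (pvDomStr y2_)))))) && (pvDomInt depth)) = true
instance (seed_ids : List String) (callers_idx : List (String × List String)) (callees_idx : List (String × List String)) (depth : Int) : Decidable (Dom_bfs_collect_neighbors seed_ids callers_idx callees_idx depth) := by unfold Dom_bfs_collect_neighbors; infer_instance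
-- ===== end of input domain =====

-- B replaces A's two level-synchronous frontier-set loops over range(depth) by one FIFO
--BFS per direction (a list used as a queue of (node, depth) pairs); same return value.
-- Both Pythons return SETS; A iterates over its frontier sets, whose hash order is not
-- modelled, but the resulting sets do not depend on that order — the ports iterate sets
-- in insertion order.

-- ===== PORT A =====
-- shared with B: `idx.get(nid, [])` on the association-list dict
def pvNbrs (idx : List (String × List String)) (nid : String) : List String :=
  PySem.Dict.getD (PySem.Dict.mk idx) nid []

-- body of A's innermost loop: state = (seen, next_frontier)
def pvAddA (seed_ids : List String) (st : PySem.Set String × PySem.Set String) (c : String) :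
    PySem.Set String × PySem.Set String :=
  if !(PySem.Set.contains st.1 c) && !(seed_ids.contains c)
  then (PySem.Set.add st.1 c, PySem.Set.add st.2 c) else st

-- one `nid` of the frontier
def pvStepA (seed_ids : List String) (idx : List (String × List String))
    (st : PySem.Set String × PySem.Set String) (nid : String) :
    PySem.Set String × PySem.Set String :=
  (pvNbrs idx nid).foldl (pvAddA seed_ids) st

-- one iteration of `for d in range(depth)`: (seen, frontier) ↦ (seen, next_frontier)
def pvLevelA (seed_ids : List String) (idx : List (String × List String))
    (st : PySem.Set String × PySem.Set String) : PySem.Set String × PySem.Set String :=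
  st.2.foldl (pvStepA seed_ids idx) (st.1, PySem.Set.empty)

def bfs_collect_neighbors (seed_ids : List String) (callers_idx : List (String × List String)) (callees_idx : List (String × List String)) (depth : Int) : List String × List String :=
  let callers_seen :=
    ((PySem.List.pyRange 0 depth 1).foldl (fun st _ => pvLevelA seed_ids callers_idx st)
      (PySem.Set.empty, PySem.Set.ofList seed_ids)).1
  let callees_seen :=
    ((PySem.List.pyRange 0 depth 1).foldl (fun st _ => pvLevelA seed_ids callees_idx st)
      (PySem.Set.empty, PySem.Set.ofList seed_ids)).1
  (callers_seen, callees_seen)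

-- ===== PORT B =====
-- body of B's innermost loop: state = (seen, tail of the queue after the read pointer)
def pvStepB (seed_ids : List String) (dd : Int)
    (st : PySem.Set String × List (String × Int)) (nb : String) :
    PySem.Set String × List (String × Int) :=
  if !(PySem.Set.contains st.1 nb) && !(seed_ids.contains nb)
  then (PySem.Set.add st.1 nb, st.2 ++ [(nb, dd + 1)]) else st

-- every neighbour the indices can produce (termination bound only)
def pvAll (idx : List (String × List String)) : List String := (idx.map Prod.snd).flatten

-- how many possible neighbours are not yet seen (termination measure only)
def pvPot (idx : List (String × List String)) (seen : List String) : Nat :=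
  ((pvAll idx).filter (fun x => !(seen.contains x))).length

theorem pvNbrs_subset (idx : List (String × List String)) (nid : String) :
    ∀ x ∈ pvNbrs idx nid, x ∈ pvAll idx := by
  induction idx with
  | nil => intro x hx; simp [pvNbrs, PySem.Dict.getD, PySem.Dict.get?] at hx
  | cons p tl ih =>
    obtain ⟨k, v⟩ := p
    intro x hx
    simp only [pvNbrs, PySem.Dict.getD_eq_get?_getD] at hx ih
    rw [PySem.Dict.get?_mk_cons] at hx
    show x ∈ (List.map Prod.snd ((k, v) :: tl)).flatten
    rw [List.map_cons, List.flatten_cons]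
    by_cases h : (k == nid) = true
    · simp only [h, if_true, Option.getD_some] at hx
      exact List.mem_append_left _ hx
    · simp only [h, Bool.false_eq_true, if_false] at hx
      exact List.mem_append_right _ (ih x hx)

theorem pvStepB_meas (seed_ids : List String) (idx : List (String × List String)) (dd : Int) :
    ∀ (nbs : List String), (∀ x ∈ nbs, x ∈ pvAll idx) →
    ∀ (seen : List String) (q : List (String × Int)),
    ((nbs.foldl (pvStepB seed_ids dd) (seen, q)).2.length
      + pvPot idx (nbs.foldl (pvStepB seed_ids dd) (seen, q)).1)
      ≤ q.length + pvPot idx seen := by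
  intro nbs
  induction nbs with
  | nil => intro _ seen q; simp
  | cons nb tl ih =>
    intro hall seen q
    have htl : ∀ x ∈ tl, x ∈ pvAll idx := fun x hx => hall x (List.mem_cons_of_mem _ hx)
    simp only [List.foldl_cons]
    by_cases hg : (!(PySem.Set.contains seen nb) && !(seed_ids.contains nb)) = true
    · have hnb : nb ∉ seen := by
        simp only [Bool.and_eq_true, Bool.not_eq_true'] at hg
        simpa using hg.1
      have hstep : pvStepB seed_ids dd (seen, q) nb
          = (seen ++ [nb], q ++ [(nb, dd + 1)]) := by
        simp only [pvStepB]
        rw [if_pos hg, PySem.Set.add_of_not_mem hnb]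
      rw [hstep]
      have hpot : pvPot idx (seen ++ [nb]) < pvPot idx seen := by
        unfold pvPot
        have : (pvAll idx).filter (fun x => !((seen ++ [nb]).contains x))
            = ((pvAll idx).filter (fun x => !(seen.contains x))).filter (fun x => !(x == nb)) := by
          rw [List.filter_filter]
          apply List.filter_congr
          intro x _
          by_cases h1 : x ∈ seen <;> by_cases h2 : x = nb <;>
            simp [h1, h2]
        rw [this]
        apply List.length_filter_lt_length_iff_exists.2
        refine ⟨nb, ?_, by simp⟩
        simp only [List.mem_filter]
        exact ⟨hall nb (List.mem_cons_self ..), by simpa using hnb⟩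
      have := ih htl (seen ++ [nb]) (q ++ [(nb, dd + 1)])
      simp only [List.length_append, List.length_cons, List.length_nil] at this ⊢
      omega
    · have hstep : pvStepB seed_ids dd (seen, q) nb = (seen, q) := by
        simp only [pvStepB]
        rw [if_neg (by simpa using hg)]
      rw [hstep]
      exact ih htl seen q

-- the `while i < len(queue)` loop: `rest` is the queue from the read pointer on
def pvLoopB (seed_ids : List String) (idx : List (String × List String)) (depth : Int)
    (seen : PySem.Set String) (rest : List (String × Int)) : PySem.Set String :=
  match rest with
  | [] => seen
  | (nid, dd) :: tl =>
    if dd < depth then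
      let r := (pvNbrs idx nid).foldl (pvStepB seed_ids dd) (seen, tl)
      pvLoopB seed_ids idx depth r.1 r.2
    else
      pvLoopB seed_ids idx depth seen tl
termination_by rest.length + pvPot idx seen
decreasing_by
  · have := pvStepB_meas seed_ids idx dd (pvNbrs idx nid) (pvNbrs_subset idx nid) seen tl
    simp only [List.length_cons]
    omega
  · simp only [List.length_cons]; omega

def bfs_collect_neighbors_alt (seed_ids : List String) (callers_idx : List (String × List String)) (callees_idx : List (String × List String)) (depth : Int) : List String × List String :=
  let walk := fun idx =>
    pvLoopB seed_ids idx depth PySem.Set.empty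
      ((PySem.List.dedup seed_ids).map (fun s => (s, (0 : Int))))
  (walk callers_idx, walk callees_idx)

-- ===== PRECONDITION & SPEC =====
def Spec_bfs_collect_neighbors (seed_ids : List String) (callers_idx : List (String × List String)) (callees_idx : List (String × List String)) (depth : Int) (out : List String × List String) : Prop := out = bfs_collect_neighbors_alt seed_ids callers_idx callees_idx depth
instance (seed_ids : List String) (callers_idx : List (String × List String)) (callees_idx : List (String × List String)) (depth : Int) (out : List String × List String) : Decidable (Spec_bfs_collect_neighbors seed_ids callers_idx callees_idx depth out) := by unfold Spec_bfs_collect_neighbors; infer_instance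

-- ===== CLAIM (what is proved, stated in full; the proofs are below) =====
def Claim_equal_bfs_collect_neighbors : Prop := ∀ (seed_ids : List String) (callers_idx : List (String × List String)) (callees_idx : List (String × List String)) (depth : Int), Dom_bfs_collect_neighbors seed_ids callers_idx callees_idx depth → Spec_bfs_collect_neighbors seed_ids callers_idx callees_idx depth (bfs_collect_neighbors seed_ids callers_idx callees_idx depth)

-- ===== LEMMAS AND PROOFS =====

-- both innermost loops produce the same block `new` of newly seen nodes
theorem pv_inner_rel (seed_ids : List String) (dd : Int) :
    ∀ (nbs seen next : List String) (q : List (String × Int)),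
    (∀ x ∈ next, x ∈ seen) →
    ∃ new : List String,
      nbs.foldl (pvAddA seed_ids) (seen, next) = (seen ++ new, next ++ new) ∧
      nbs.foldl (pvStepB seed_ids dd) (seen, q)
        = (seen ++ new, q ++ new.map (fun x => (x, dd + 1))) := by
  intro nbs
  induction nbs with
  | nil => intro seen next q _; exact ⟨[], by simp, by simp⟩
  | cons c tl ih =>
    intro seen next q hsub
    simp only [List.foldl_cons]
    by_cases hg : (!(PySem.Set.contains seen c) && !(seed_ids.contains c)) = true
    · have hc : c ∉ seen := by
        simp only [Bool.and_eq_true, Bool.not_eq_true'] at hg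
        simpa using hg.1
      have hcn : c ∉ next := fun h => hc (hsub c h)
      have hA : pvAddA seed_ids (seen, next) c = (seen ++ [c], next ++ [c]) := by
        simp only [pvAddA]
        rw [if_pos hg, PySem.Set.add_of_not_mem hc, PySem.Set.add_of_not_mem hcn]
      have hB : pvStepB seed_ids dd (seen, q) c = (seen ++ [c], q ++ [(c, dd + 1)]) := by
        simp only [pvStepB]
        rw [if_pos hg, PySem.Set.add_of_not_mem hc]
      rw [hA, hB]
      obtain ⟨new, h1, h2⟩ := ih (seen ++ [c]) (next ++ [c]) (q ++ [(c, dd + 1)])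
        (by intro x hx
            rcases List.mem_append.1 hx with h | h
            · exact List.mem_append.2 (Or.inl (hsub x h))
            · exact List.mem_append.2 (Or.inr h))
      exact ⟨c :: new, by simpa [List.append_assoc] using h1,
        by simpa [List.append_assoc] using h2⟩
    · have hA : pvAddA seed_ids (seen, next) c = (seen, next) := by
        simp only [pvAddA]; rw [if_neg (by simpa using hg)]
      have hB : pvStepB seed_ids dd (seen, q) c = (seen, q) := by
        simp only [pvStepB]; rw [if_neg (by simpa using hg)]
      rw [hA, hB]
      exact ih seen next q hsub

-- the queue loop ends as soon as every queued depth has reached `depth`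
theorem pv_loop_stop (seed_ids : List String) (idx : List (String × List String)) (depth : Int) :
    ∀ (rest : List (String × Int)) (seen : PySem.Set String),
    (∀ p ∈ rest, ¬ p.2 < depth) → pvLoopB seed_ids idx depth seen rest = seen := by
  intro rest
  induction rest with
  | nil => intro seen _; rw [pvLoopB]
  | cons p tl ih =>
    intro seen h
    obtain ⟨nid, dd⟩ := p
    rw [pvLoopB]
    rw [if_neg (h (nid, dd) (List.mem_cons_self ..))]
    exact ih seen (fun p hp => h p (List.mem_cons_of_mem _ hp))

-- draining one whole level of the queue is one frontier iteration of A
theorem pv_level_rel (seed_ids : List String) (idx : List (String × List String)) (depth : Int) :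
    ∀ (frontier seen pend : List String) (dd : Int), dd < depth →
    (∀ x ∈ pend, x ∈ seen) →
    pvLoopB seed_ids idx depth seen
        (frontier.map (fun x => (x, dd)) ++ pend.map (fun x => (x, dd + 1)))
      = pvLoopB seed_ids idx depth
          (frontier.foldl (pvStepA seed_ids idx) (seen, pend)).1
          ((frontier.foldl (pvStepA seed_ids idx) (seen, pend)).2.map (fun x => (x, dd + 1))) := by
  intro frontier
  induction frontier with
  | nil => intro seen pend dd _ _; simp
  | cons nid tl ih =>
    intro seen pend dd hdd hsub
    simp only [List.map_cons, List.cons_append]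
    rw [pvLoopB, if_pos hdd]
    obtain ⟨new, h1, h2⟩ := pv_inner_rel seed_ids dd (pvNbrs idx nid) seen pend
      (tl.map (fun x => (x, dd)) ++ pend.map (fun x => (x, dd + 1))) hsub
    simp only [h2]
    have hq : tl.map (fun x => (x, dd)) ++ pend.map (fun x => (x, dd + 1))
        ++ new.map (fun x => (x, dd + 1))
        = tl.map (fun x => (x, dd)) ++ (pend ++ new).map (fun x => (x, dd + 1)) := by
      simp [List.append_assoc]
    rw [hq]
    rw [ih (seen ++ new) (pend ++ new) dd hdd
      (by intro x hx
          rcases List.mem_append.1 hx with h | h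
          · exact List.mem_append.2 (Or.inl (hsub x h))
          · exact List.mem_append.2 (Or.inr h))]
    simp only [List.foldl_cons, pvStepA, h1]

-- the whole queue loop is `n` frontier iterations of A, when `dd + n = depth`
theorem pv_main_rel (seed_ids : List String) (idx : List (String × List String)) (depth : Int) :
    ∀ (n : Nat) (dd : Int) (seen frontier : List String), dd + n = depth →
    pvLoopB seed_ids idx depth seen (frontier.map (fun x => (x, dd)))
      = ((pvLevelA seed_ids idx)^[n] (seen, frontier)).1 := by
  intro n
  induction n with
  | zero =>
    intro dd seen frontier h
    rw [pv_loop_stop]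
    · simp
    · intro p hp
      simp only [List.mem_map] at hp
      obtain ⟨x, _, rfl⟩ := hp
      omega
  | succ n ih =>
    intro dd seen frontier h
    have hdd : dd < depth := by omega
    have := pv_level_rel seed_ids idx depth frontier seen [] dd hdd (by simp)
    simp only [List.map_nil, List.append_nil] at this
    rw [this, ih (dd + 1) _ _ (by omega), Function.iterate_succ_apply]
    rfl

-- A's fold over range(depth) is an iterate of pvLevelA
theorem pv_walk_eq (seed_ids : List String) (idx : List (String × List String)) (depth : Int) :
    pvLoopB seed_ids idx depth PySem.Set.empty
        ((PySem.List.dedup seed_ids).map (fun s => (s, (0 : Int))))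
      = ((PySem.List.pyRange 0 depth 1).foldl (fun st _ => pvLevelA seed_ids idx st)
          (PySem.Set.empty, PySem.Set.ofList seed_ids)).1 := by
  rw [List.foldl_const, PySem.List.dedup_eq_ofList]
  rcases le_or_gt depth 0 with h | h
  · rw [PySem.List.pyRange_one_eq_nil h]
    simp only [List.length_nil, Function.iterate_zero, id]
    apply pv_loop_stop
    intro p hp
    simp only [List.mem_map] at hp
    obtain ⟨x, _, rfl⟩ := hp
    omega
  · have hn : (0 : Int) + ((PySem.List.pyRange 0 depth 1).length : Nat) = depth := by
      rw [PySem.List.length_pyRange_one]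
      omega
    exact pv_main_rel seed_ids idx depth _ 0 PySem.Set.empty (PySem.Set.ofList seed_ids) hn

-- ===== VERDICT (by name: the statement is the Claim_ definition above) =====
theorem bfs_collect_neighbors_spec : Claim_equal_bfs_collect_neighbors := by
  intro seed_ids callers_idx callees_idx depth _
  unfold Spec_bfs_collect_neighbors bfs_collect_neighbors bfs_collect_neighbors_alt
  simp only
  rw [pv_walk_eq seed_ids callers_idx depth, pv_walk_eq seed_ids callees_idx depth]
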